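-- pv_equiv track=rewrite | github.com/Relativity74205/murkelhausen_app | .github/actions/semver/semver_tagging.py | get_upgrade_type
-- ===== SOURCE A (Python) =====
-- from enum import StrEnum, auto
--
-- class UpgradeType(StrEnum):
--     MAJOR = auto()
--     MINOR = auto()
--     PATCH = auto()
--     NONE = auto()
--
-- def get_conventional_commits_prefix(commit_message: str) -> str | None:
--     try:
--         return commit_message.split(":")[0]
--     except IndexError:
--         return None
--
-- def is_breaking_change(commit_message: str) -> bool:
--     return "BREAKING" in commit_message
--
-- def get_upgrade_type(commit_messages: list[str]) -> UpgradeType: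
--     for commit_message in commit_messages:
--         if is_breaking_change(commit_message):
--             return UpgradeType.MAJOR
--
--     for commit_message in commit_messages:
--         if get_conventional_commits_prefix(commit_message) == "feat":
--             return UpgradeType.MINOR
--
--     for commit_message in commit_messages:
--         if get_conventional_commits_prefix(commit_message) == "fix":
--             return UpgradeType.PATCH
--
--     return UpgradeType.NONE
-- ===== SOURCE B (Python) =====
-- from enum import StrEnum, auto
--
-- class UpgradeType(StrEnum):
--     MAJOR = auto()
--     MINOR = auto()
--     PATCH = auto()
--     NONE = auto()
--
-- def get_conventional_commits_prefix(commit_message: str) -> str | None: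
--     try:
--         return commit_message.split(":")[0]
--     except IndexError:
--         return None
--
-- def is_breaking_change(commit_message: str) -> bool:
--     return "BREAKING" in commit_message
--
-- def get_upgrade_type(commit_messages: list[str]) -> UpgradeType:
--     feat_seen = False
--     fix_seen = False
--     for commit_message in commit_messages:
--         if is_breaking_change(commit_message):
--             return UpgradeType.MAJOR
--         prefix = get_conventional_commits_prefix(commit_message)
--         feat_seen = feat_seen or prefix == "feat"
--         fix_seen = fix_seen or prefix == "fix"
--     if feat_seen:
--         return UpgradeType.MINOR
--     if fix_seen:
--         return UpgradeType.PATCH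
--     return UpgradeType.NONE
-- ===== Notes on version B (the rewrite author's own statement) =====
-- stated objective: alternative
-- what changed: Replaces A's three sequential scans of commit_messages by one single pass that early-returns MAJOR on a breaking commit and otherwise accumulates feat/fix flags decided after the loop.
import Mathlib
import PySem

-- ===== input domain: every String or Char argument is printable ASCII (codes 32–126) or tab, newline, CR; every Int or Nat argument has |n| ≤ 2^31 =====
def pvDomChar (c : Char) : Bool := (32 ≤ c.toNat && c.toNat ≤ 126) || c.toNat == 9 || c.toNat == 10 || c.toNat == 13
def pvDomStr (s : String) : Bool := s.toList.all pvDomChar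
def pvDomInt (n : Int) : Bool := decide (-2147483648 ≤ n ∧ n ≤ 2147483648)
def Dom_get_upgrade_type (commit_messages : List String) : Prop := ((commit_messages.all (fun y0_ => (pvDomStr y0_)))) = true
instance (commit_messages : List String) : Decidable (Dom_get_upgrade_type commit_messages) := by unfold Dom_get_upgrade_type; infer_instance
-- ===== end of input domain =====

-- B replaces A's three sequential scans by one single pass (early MAJOR return, feat/fix flags decided after the loop); same results.


-- ===== PORT A =====
-- commit_message.split(":")[0]; the [0] via pyGet? (none = the IndexError branch returning None)
def pv_get_conventional_commits_prefix (commit_message : String) : Option String :=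
  PySem.List.pyGet? ((PySem.Str.split? commit_message ":").getD []) 0

def pv_is_breaking_change (commit_message : String) : Bool :=
  PySem.Str.isIn "BREAKING" commit_message

-- third loop of A ('fix'), falling through to NONE
def pvA_loop3 : List String → String
  | [] => "none"
  | m :: rest =>
      if pv_get_conventional_commits_prefix m == some "fix" then "patch" else pvA_loop3 rest

-- second loop of A ('feat'), then the third loop over the whole list
def pvA_loop2 (all : List String) : List String → String
  | [] => pvA_loop3 all
  | m :: rest =>
      if pv_get_conventional_commits_prefix m == some "feat" then "minor" else pvA_loop2 all rest

-- first loop of A (breaking), then the second loop over the whole list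
def pvA_loop1 (all : List String) : List String → String
  | [] => pvA_loop2 all all
  | m :: rest =>
      if pv_is_breaking_change m then "major" else pvA_loop1 all rest

def get_upgrade_type (commit_messages : List String) : String :=
  pvA_loop1 commit_messages commit_messages

-- ===== PORT B =====
-- single pass: early return on breaking, feat/fix booleans decided after the loop
def pvB_loop : List String → Bool → Bool → String
  | [], feat_seen, fix_seen =>
      if feat_seen then "minor" else if fix_seen then "patch" else "none"
  | m :: rest, feat_seen, fix_seen =>
      if pv_is_breaking_change m then "major"
      else
        let p := pv_get_conventional_commits_prefix m
        pvB_loop rest (feat_seen || p == some "feat") (fix_seen || p == some "fix")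

def get_upgrade_type_alt (commit_messages : List String) : String :=
  pvB_loop commit_messages false false

-- ===== PRECONDITION & SPEC =====
def Spec_get_upgrade_type (commit_messages : List String) (out : String) : Prop := out = get_upgrade_type_alt commit_messages
instance (commit_messages : List String) (out : String) : Decidable (Spec_get_upgrade_type commit_messages out) := by unfold Spec_get_upgrade_type; infer_instance

-- ===== CLAIM (what is proved, stated in full; the proofs are below) =====
def Claim_equal_get_upgrade_type : Prop := ∀ (commit_messages : List String), Dom_get_upgrade_type commit_messages → Spec_get_upgrade_type commit_messages (get_upgrade_type commit_messages)

-- ===== LEMMAS AND PROOFS =====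

def pvIsFeat (m : String) : Bool := pv_get_conventional_commits_prefix m == some "feat"
def pvIsFix (m : String) : Bool := pv_get_conventional_commits_prefix m == some "fix"

lemma pvA_loop3_char (ms : List String) :
    pvA_loop3 ms = if ms.any pvIsFix then "patch" else "none" := by
  induction ms with
  | nil => simp [pvA_loop3]
  | cons m rest ih =>
      simp only [pvA_loop3, List.any_cons, pvIsFix]
      by_cases h : (pv_get_conventional_commits_prefix m == some "fix") = true <;> simp [h, ih]

lemma pvA_loop2_char (all ms : List String) :
    pvA_loop2 all ms = if ms.any pvIsFeat then "minor" else pvA_loop3 all := by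
  induction ms with
  | nil => simp [pvA_loop2]
  | cons m rest ih =>
      simp only [pvA_loop2, List.any_cons, pvIsFeat]
      by_cases h : (pv_get_conventional_commits_prefix m == some "feat") = true <;> simp [h, ih]

lemma pvA_loop1_char (all ms : List String) :
    pvA_loop1 all ms = if ms.any pv_is_breaking_change then "major" else pvA_loop2 all all := by
  induction ms with
  | nil => simp [pvA_loop1]
  | cons m rest ih =>
      simp only [pvA_loop1, List.any_cons]
      by_cases h : pv_is_breaking_change m = true <;> simp [h, ih]

lemma pvB_loop_char (ms : List String) (feat fix : Bool) :
    pvB_loop ms feat fix =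
      if ms.any pv_is_breaking_change then "major"
      else if feat || ms.any pvIsFeat then "minor"
      else if fix || ms.any pvIsFix then "patch"
      else "none" := by
  induction ms generalizing feat fix with
  | nil => simp [pvB_loop]
  | cons m rest ih =>
      simp only [pvB_loop, List.any_cons]
      by_cases hb : pv_is_breaking_change m = true
      · simp [hb]
      · simp only [hb, Bool.false_or]
        rw [ih]
        simp [pvIsFeat, pvIsFix, Bool.or_assoc]

-- ===== VERDICT (by name: the statement is the Claim_ definition above) =====
theorem get_upgrade_type_spec : Claim_equal_get_upgrade_type := by
  intro ms _
  unfold Spec_get_upgrade_type get_upgrade_type get_upgrade_type_alt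
  rw [pvA_loop1_char, pvA_loop2_char, pvA_loop3_char, pvB_loop_char]
  simp
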